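-- pv_equiv track=rewrite | github.com/Bartoszak/StellarisEmpireRandomiser | main.py | separateEmpires
-- ===== SOURCE A (Python) =====
-- def separateEmpires(s:str):
--     empires = []
--     counter = 0
--     current_empire = [0, 0]
--     lookint_for = 'start'
--     skip_one = True
--     for iter in range(0, len(s)):
--         if s[iter] == '{':
--             counter += 1
--         if s[iter] == '}':
--             counter -= 1
--         if counter == 0 and s[iter] == '"':
--             if lookint_for == 'start':
--                 current_empire[0] = iter
--                 lookint_for = 'end'
--                 continue
--             if lookint_for == 'end':
--                 if skip_one:
--                     skip_one = False
--                     continue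
--                 current_empire[1] = iter
--                 empires.append((current_empire[0], current_empire[1]))
--                 current_empire[0] = current_empire[1]
--                 lookint_for = 'end'
--                 skip_one = True
--                 continue
--     empires.append((current_empire[0], len(s)))
--     list_of_empires = []
--     for empire in empires:
--         list_of_empires.append(s[empire[0]:empire[1]])
--     return list_of_empires
-- ===== SOURCE B (Python) =====
-- def separateEmpires(s: str):
--     quotes = []
--     depth = 0
--     for i, c in enumerate(s):
--         if c == '{':
--             depth += 1
--         elif c == '}':
--             depth -= 1
--         elif depth == 0 and c == '"':
--             quotes.append(i)
--     starts = quotes[0::2] or [0]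
--     return [s[a:b] for a, b in zip(starts, starts[1:])] + [s[starts[-1]:]]
-- ===== Notes on version B (the rewrite author's own statement) =====
-- stated objective: simpler
-- what changed: Replaces A's interleaved state-machine (looking-for-start/skip-one flags, mutable current_empire pair) by a two-pass decomposition: one pass collects the depth-0 quote indices, then every other index (quotes[0::2], or [0] if none) is used as a boundary and the result is built by slicing between consecutive boundaries.
import Mathlib
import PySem

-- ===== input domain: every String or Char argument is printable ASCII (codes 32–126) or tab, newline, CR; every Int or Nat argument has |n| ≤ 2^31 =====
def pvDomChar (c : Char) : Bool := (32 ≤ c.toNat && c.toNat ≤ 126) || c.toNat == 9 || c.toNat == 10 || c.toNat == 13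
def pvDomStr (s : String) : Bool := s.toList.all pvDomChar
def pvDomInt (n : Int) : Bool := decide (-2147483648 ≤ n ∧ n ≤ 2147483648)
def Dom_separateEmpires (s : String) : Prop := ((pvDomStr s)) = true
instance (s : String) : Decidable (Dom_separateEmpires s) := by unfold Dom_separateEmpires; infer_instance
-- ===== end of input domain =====

-- B replaces A's interleaved quote state-machine (looking/skip flags) by a two-pass
-- decomposition: collect depth-0 quote indices, take every other one, slice between them (simpler).


-- ===== PORT A =====
-- A's loop: state (empires, counter, current_empire, lookint_for == 'start', skip_one)
def seLoopA : List (Int × Char) → List (Int × Int) → Int → Int × Int → Bool → Bool → List (Int × Int) × (Int × Int)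
  | [], empires, _, cur, _, _ => (empires, cur)
  | (i, c) :: rest, empires, counter, cur, lookingStart, skipOne =>
    let counter1 := if c = '{' then counter + 1 else counter
    let counter2 := if c = '}' then counter1 - 1 else counter1
    if counter2 = 0 ∧ c = '"' then
      if lookingStart then
        seLoopA rest empires counter2 (i, cur.2) false skipOne
      else if skipOne then
        seLoopA rest empires counter2 cur false false
      else
        seLoopA rest (empires ++ [(cur.1, i)]) counter2 (i, i) false true
    else
      seLoopA rest empires counter2 cur lookingStart skipOne

def separateEmpires (s : String) : List String :=
  let cs := s.toList
  let r := seLoopA (PySem.List.enumerate cs) [] 0 (0, 0) true true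
  let empires := r.1 ++ [(r.2.1, (cs.length : Int))]
  empires.map (fun e => String.ofList (PySem.List.slice cs (some e.1) (some e.2)))

-- ===== PORT B =====
-- B's single collecting pass over (index, char)
def seScanB : List (Int × Char) → Int → List Int → List Int
  | [], _, quotes => quotes
  | (i, c) :: rest, depth, quotes =>
    if c = '{' then seScanB rest (depth + 1) quotes
    else if c = '}' then seScanB rest (depth - 1) quotes
    else if depth = 0 ∧ c = '"' then seScanB rest depth (quotes ++ [i])
    else seScanB rest depth quotes

-- quotes[0::2]
def seEvens : List Int → List Int
  | [] => []
  | [x] => [x]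
  | x :: _ :: rest => x :: seEvens rest

def separateEmpires_alt (s : String) : List String :=
  let cs := s.toList
  let quotes := seScanB (PySem.List.enumerate cs) 0 []
  let starts := if seEvens quotes = [] then [0] else seEvens quotes
  (List.zip starts starts.tail).map
      (fun p => String.ofList (PySem.List.slice cs (some p.1) (some p.2)))
    ++ [String.ofList (PySem.List.slice cs (some (starts.getLastD 0)) none)]

-- ===== PRECONDITION & SPEC =====
def Spec_separateEmpires (s : String) (out : List String) : Prop := out = separateEmpires_alt s
instance (s : String) (out : List String) : Decidable (Spec_separateEmpires s out) := by unfold Spec_separateEmpires; infer_instance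

-- ===== CLAIM (what is proved, stated in full; the proofs are below) =====
def Claim_equal_separateEmpires : Prop := ∀ (s : String), Dom_separateEmpires s → Spec_separateEmpires s (separateEmpires s)

-- ===== LEMMAS AND PROOFS =====

-- every other element of r, starting from the second (helper for relating the two ports)
def seEvensOdd : List Int → List Int
  | [] => []
  | _ :: r => seEvens r

theorem seEvens_cons (x : Int) (r : List Int) : seEvens (x :: r) = x :: seEvensOdd r := by
  cases r <;> simp [seEvens, seEvensOdd]

-- abstract form of A's loop after the first boundary quote
def sePair (c0 : Int) (skip : Bool) : List Int → List (Int × Int) × Int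
  | [] => ([], c0)
  | q :: rest =>
    if skip then sePair c0 false rest
    else ((c0, q) :: (sePair q true rest).1, (sePair q true rest).2)

theorem sePair_cons (c0 : Int) (skip : Bool) (q : Int) (rest : List Int) :
    sePair c0 skip (q :: rest) =
      if skip then sePair c0 false rest
      else ((c0, q) :: (sePair q true rest).1, (sePair q true rest).2) := by
  rfl

theorem seScanB_acc (l : List (Int × Char)) : ∀ (d : Int) (acc : List Int),
    seScanB l d acc = acc ++ seScanB l d [] := by
  induction l with
  | nil => intro d acc; simp [seScanB]
  | cons p rest ih =>
    intro d acc
    obtain ⟨i, c⟩ := p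
    simp only [seScanB]
    split_ifs with h1 h2 h3
    · exact ih _ _
    · exact ih _ _
    · rw [ih _ (acc ++ [i])]; simp only [List.nil_append]; rw [ih _ [i]]; simp
    · exact ih _ _

theorem seLoopA_false (l : List (Int × Char)) :
    ∀ (E : List (Int × Int)) (d : Int) (c0 c1 : Int) (skip : Bool),
    (seLoopA l E d (c0, c1) false skip).1 = E ++ (sePair c0 skip (seScanB l d [])).1 ∧
    (seLoopA l E d (c0, c1) false skip).2.1 = (sePair c0 skip (seScanB l d [])).2 := by
  induction l with
  | nil => intro E d c0 c1 skip; simp [seLoopA, seScanB, sePair]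
  | cons p rest ih =>
    intro E d c0 c1 skip
    obtain ⟨i, c⟩ := p
    by_cases hc1 : c = '{'
    · subst hc1
      simp only [seLoopA, seScanB]
      simp
      simpa using ih E (d + 1) c0 c1 skip
    · by_cases hc2 : c = '}'
      · subst hc2
        simp only [seLoopA, seScanB]
        simp
        simpa using ih E (d - 1) c0 c1 skip
      · by_cases hc3 : c = '"'
        · subst hc3
          by_cases hd : d = 0
          · subst hd
            simp only [seLoopA, seScanB]
            simp only [show (('"' : Char) = '{') = False from by decide, show (('"' : Char) = '}') = False from by decide, if_false, and_true]
            norm_num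
            rw [seScanB_acc rest 0 [i]]
            simp only [List.singleton_append]
            cases skip
            · -- skip_one = False: append (c0, i), continue from (i, i) with skip = True
              rw [sePair_cons]
              simp only [Bool.false_eq_true, if_false]
              constructor
              · rw [(ih (E ++ [(c0, i)]) 0 i i true).1]; simp
              · exact (ih (E ++ [(c0, i)]) 0 i i true).2
            · -- skip_one = True
              rw [sePair_cons]
              simp only [if_true]
              exact ih E 0 c0 c1 false
          · simp only [seLoopA, seScanB]
            simp [hd]
            simpa using ih E d c0 c1 skip
        · simp only [seLoopA, seScanB]
          simp [hc1, hc2, hc3]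
          simpa using ih E d c0 c1 skip

theorem seLoopA_true (l : List (Int × Char)) :
    ∀ (E : List (Int × Int)) (d : Int) (c0 c1 : Int),
    (seLoopA l E d (c0, c1) true true).1 =
      E ++ (match seScanB l d [] with
            | [] => []
            | q :: rest => (sePair q true rest).1) ∧
    (seLoopA l E d (c0, c1) true true).2.1 =
      (match seScanB l d [] with
       | [] => c0
       | q :: rest => (sePair q true rest).2) := by
  induction l with
  | nil => intro E d c0 c1; simp [seLoopA, seScanB]
  | cons p rest ih =>
    intro E d c0 c1
    obtain ⟨i, c⟩ := p
    by_cases hc1 : c = '{'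
    · subst hc1
      simp only [seLoopA, seScanB]
      simp
      simpa using ih E (d + 1) c0 c1
    · by_cases hc2 : c = '}'
      · subst hc2
        simp only [seLoopA, seScanB]
        simp
        simpa using ih E (d - 1) c0 c1
      · by_cases hc3 : c = '"'
        · subst hc3
          by_cases hd : d = 0
          · subst hd
            simp only [seLoopA, seScanB]
            simp only [show (('"' : Char) = '{') = False from by decide, show (('"' : Char) = '}') = False from by decide, if_false, and_true]
            norm_num
            rw [seScanB_acc rest 0 [i]]
            simp only [List.singleton_append]
            exact seLoopA_false rest E 0 i c1 true
          · simp only [seLoopA, seScanB]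
            simp [hd]
            simpa using ih E d c0 c1
        · simp only [seLoopA, seScanB]
          simp [hc1, hc2, hc3]
          simpa using ih E d c0 c1

theorem sePair_true_eq (rest : List Int) (q : Int) :
    sePair q true rest =
      (List.zip (q :: seEvensOdd rest) (seEvensOdd rest), (q :: seEvensOdd rest).getLastD 0) := by
  match rest with
  | [] => simp [sePair, seEvensOdd]
  | [a] => simp [sePair, seEvensOdd, seEvens]
  | a :: b :: r =>
    have ih := sePair_true_eq r b
    rw [sePair_cons, if_pos rfl, sePair_cons, if_neg (by simp), ih]
    simp [seEvensOdd, seEvens_cons, List.getLastD]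
termination_by rest.length

theorem seScanB_nonneg (l : List (Int × Char)) :
    ∀ (d : Int) (acc : List Int), (∀ q ∈ acc, 0 ≤ q) → (∀ p ∈ l, 0 ≤ p.1) →
    ∀ q ∈ seScanB l d acc, 0 ≤ q := by
  induction l with
  | nil => intro d acc hacc _ q hq; exact hacc q (by simpa [seScanB] using hq)
  | cons p rest ih =>
    intro d acc hacc hl q hq
    obtain ⟨i, c⟩ := p
    have hi : 0 ≤ i := hl (i, c) (by simp)
    have hrest : ∀ p ∈ rest, 0 ≤ p.1 := fun p hp => hl p (by simp [hp])
    simp only [seScanB] at hq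
    split_ifs at hq
    · exact ih _ _ hacc hrest q hq
    · exact ih _ _ hacc hrest q hq
    · refine ih _ _ ?_ hrest q hq
      intro x hx
      rcases List.mem_append.1 hx with h | h
      · exact hacc x h
      · simp at h; omega
    · exact ih _ _ hacc hrest q hq

theorem seEvens_subset (l : List Int) : ∀ x ∈ seEvens l, x ∈ l := by
  match l with
  | [] => simp [seEvens]
  | [a] => simp [seEvens]
  | a :: b :: r =>
    intro x hx
    rw [seEvens] at hx
    rcases List.mem_cons.1 hx with h | h
    · simp [h]
    · have := seEvens_subset r x h
      simp [this]
termination_by l.length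

theorem seGetLastD_mem : ∀ (t : List Int) (q d : Int), (q :: t).getLastD d ∈ q :: t
  | [], q, d => by simp
  | b :: t, q, d => by
    rw [List.getLastD_cons]
    exact List.mem_cons_of_mem q (seGetLastD_mem t b q)

theorem seSliceLen (cs : List Char) (a : Int) (ha : 0 ≤ a) :
    PySem.List.slice cs (some a) (some (cs.length : Int)) = PySem.List.slice cs (some a) none := by
  rw [PySem.List.slice_toNat cs ha (by positivity), PySem.List.slice_from cs ha]
  apply List.take_of_length_le
  simp

-- ===== VERDICT (by name: the statement is the Claim_ definition above) =====
theorem separateEmpires_spec : Claim_equal_separateEmpires := by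
  intro s _
  unfold Spec_separateEmpires separateEmpires separateEmpires_alt
  simp only []
  have henum : ∀ p ∈ PySem.List.enumerate s.toList, 0 ≤ p.1 := by
    intro p hp
    rcases (PySem.List.mem_enumerate_iff _ _ p).1 hp with ⟨k, hk, rfl⟩
    simp
  have hnn : ∀ x ∈ seScanB (PySem.List.enumerate s.toList) 0 [], 0 ≤ x :=
    seScanB_nonneg _ 0 [] (by simp) henum
  have h := seLoopA_true (PySem.List.enumerate s.toList) [] 0 0 0
  rw [h.1, h.2]
  cases hq : seScanB (PySem.List.enumerate s.toList) 0 [] with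
  | nil =>
    dsimp only
    simp [seEvens, PySem.List.slice_to_natCast, PySem.List.slice_none_none,
      -String.length_toList, List.take_length]
  | cons q rest =>
    rw [hq] at hnn
    dsimp only
    rw [sePair_true_eq, seEvens_cons]
    have hlast : 0 ≤ (q :: seEvensOdd rest).getLastD 0 := by
      apply hnn
      apply seEvens_subset (q :: rest)
      rw [seEvens_cons]
      exact seGetLastD_mem _ q 0
    simp only [List.nil_append, reduceCtorEq, if_false, List.tail_cons, List.map_append,
      List.map_cons, List.map_nil]
    rw [seSliceLen _ _ hlast]
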